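-- pv_equiv track=rewrite | github.com/pucrs-cc-marlon/trabalho-ia-aprendizado-de-maquina | pre_processamento.py | split_texts
-- ===== SOURCE A (Python) =====
-- def split_texts(lines):
--     textos = {}
--     actual_text = None
--     for line in lines:
--         if line.find('TEXTO') == 0:
--             actual_text = line.replace('\n', '')
--             textos[actual_text] = []
--         else:
--             if actual_text is not None:
--                 textos[actual_text].append(line)
--     return textos
-- ===== SOURCE B (Python) =====
-- def split_texts(lines):
--     # Chunk-based: skip lines before the first header, then repeatedly take a
--     # header and the run of following non-header lines as one slice.
--     n = len(lines)
--     i = 0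
--     while i < n and not lines[i].startswith('TEXTO'):
--         i += 1
--     textos = {}
--     while i < n:
--         header = lines[i].replace('\n', '')
--         j = i + 1
--         while j < n and not lines[j].startswith('TEXTO'):
--             j += 1
--         textos[header] = lines[i + 1:j]
--         i = j
--     return textos
-- ===== Notes on version B (the rewrite author's own statement) =====
-- stated objective: alternative
-- what changed: Replaces A's per-line state machine (current-header variable with per-line dict appends) by a chunk decomposition: skip the pre-header prefix, then repeatedly take a header and the whole run of following non-header lines as one slice inserted at once.
import Mathlib
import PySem

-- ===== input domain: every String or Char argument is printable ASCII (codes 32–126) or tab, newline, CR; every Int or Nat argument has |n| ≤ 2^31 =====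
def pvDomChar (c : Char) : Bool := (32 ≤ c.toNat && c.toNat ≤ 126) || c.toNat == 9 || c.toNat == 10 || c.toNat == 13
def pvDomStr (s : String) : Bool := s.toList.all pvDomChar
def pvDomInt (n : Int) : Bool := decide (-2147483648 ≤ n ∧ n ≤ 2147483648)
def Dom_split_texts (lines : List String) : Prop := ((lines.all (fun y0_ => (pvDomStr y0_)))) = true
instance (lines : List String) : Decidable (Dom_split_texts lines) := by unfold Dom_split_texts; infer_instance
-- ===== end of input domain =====

-- ===== PORT A =====
-- B groups lines by chunk slicing instead of A's per-line state machine; equivalence is exact (A is total).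
def pvStepA (st : PySem.Dict String (List String) × Option String) (line : String) :
    PySem.Dict String (List String) × Option String :=
  if PySem.Str.find line "TEXTO" == 0 then
    let h := PySem.Str.replace line "\n" ""
    (st.1.insert h [], some h)
  else
    match st.2 with
    | some h => (st.1.modify h [] (fun v => v ++ [line]), st.2)
    | none => st

def split_texts (lines : List String) : List (String × List String) :=
  (lines.foldl pvStepA (PySem.Dict.empty, none)).1.items

-- ===== PORT B =====
def pvIsHeader (line : String) : Bool := PySem.Str.startswith line "TEXTO"

-- the inner while loop of B: scan forward past the run of non-header lines (takeWhile = the slice, dropWhile = the rest)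
def pvChunks : List String → List (String × List String)
  | [] => []
  | l :: ls =>
    (PySem.Str.replace l "\n" "", ls.takeWhile (fun x => !pvIsHeader x)) ::
      pvChunks (ls.dropWhile (fun x => !pvIsHeader x))
termination_by L => L.length
decreasing_by
  have := List.length_dropWhile_le (fun x => !pvIsHeader x) ls
  simp only [List.length_cons]; omega

def split_texts_alt (lines : List String) : List (String × List String) :=
  ((pvChunks (lines.dropWhile (fun x => !pvIsHeader x))).foldl
    (fun d p => d.insert p.1 p.2) PySem.Dict.empty).items

-- ===== PRECONDITION & SPEC =====
def Spec_split_texts (lines : List String) (out : List (String × List String)) : Prop := out = split_texts_alt lines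
instance (lines : List String) (out : List (String × List String)) : Decidable (Spec_split_texts lines out) := by unfold Spec_split_texts; infer_instance

-- ===== CLAIM (what is proved, stated in full; the proofs are below) =====
def Claim_equal_split_texts : Prop := ∀ (lines : List String), Dom_split_texts lines → Spec_split_texts lines (split_texts lines)

-- ===== LEMMAS AND PROOFS =====

-- A's test `line.find('TEXTO') == 0` is B's `line.startswith('TEXTO')`
theorem pv_find_zero_eq_startswith (line : String) :
    (PySem.Str.find line "TEXTO" == 0) = pvIsHeader line := by
  rw [Bool.eq_iff_iff]
  simp only [beq_iff_eq, PySem.Str.find_eq, pvIsHeader, PySem.Str.startswith_eq]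
  constructor
  · intro h
    have h0 : (0:Int) ≤ PySem.Chars.find line.toList "TEXTO".toList := by omega
    have hs := (PySem.Chars.find_spec h0).1
    rw [h] at hs
    simp at hs
    exact (PySem.Chars.startswith_iff _ _).mpr hs
  · intro h
    have hp := (PySem.Chars.startswith_iff _ _).mp h
    have h0 : (0:Int) ≤ PySem.Chars.find line.toList "TEXTO".toList :=
      (PySem.Chars.find_nonneg_iff _ _).mpr hp.isInfix
    have spec := PySem.Chars.find_spec h0
    by_contra hne
    have hpos : (0:Int) < PySem.Chars.find line.toList "TEXTO".toList := lt_of_le_of_ne h0 (Ne.symm hne)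
    exact spec.2 0 (by omega) (by simpa using hp)

-- how A's loop body acts on each kind of line
theorem pvStepA_header (st : PySem.Dict String (List String) × Option String) (l : String)
    (hl : pvIsHeader l = true) :
    pvStepA st l = (st.1.insert (PySem.Str.replace l "\n" "") [],
      some (PySem.Str.replace l "\n" "")) := by
  have hc : (PySem.Str.find l "TEXTO" == 0) = true := by rw [pv_find_zero_eq_startswith]; exact hl
  unfold pvStepA; rw [hc]; rfl

theorem pvStepA_nonheader (st : PySem.Dict String (List String) × Option String) (l : String)
    (hl : pvIsHeader l = false) :
    pvStepA st l = match st.2 with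
      | some h => (st.1.modify h [] (fun v => v ++ [l]), st.2)
      | none => st := by
  have hc : (PySem.Str.find l "TEXTO" == 0) = false := by rw [pv_find_zero_eq_startswith]; exact hl
  unfold pvStepA; rw [hc]; rfl

theorem pv_modify_insert (d : PySem.Dict String (List String)) (h : String) (v : List String)
    (f : List String → List String) : (d.insert h v).modify h [] f = d.insert h (f v) := by
  simp [PySem.Dict.modify, PySem.Dict.getD_insert_self, PySem.Dict.insert_insert_self]

-- with no current header, A skips the leading non-header lines
theorem pv_skip (L : List String) (d : PySem.Dict String (List String)) :
    L.foldl pvStepA (d, none) = (L.dropWhile (fun x => !pvIsHeader x)).foldl pvStepA (d, none) := by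
  induction L with
  | nil => rfl
  | cons l ls ih =>
    by_cases hl : pvIsHeader l = true
    · simp [hl]
    · have hl' : pvIsHeader l = false := by simpa using hl
      simp only [List.dropWhile_cons, hl', Bool.not_false, List.foldl_cons]
      rw [pvStepA_nonheader _ _ hl']
      exact ih

-- inside a group, A's per-line appends amount to appending the whole non-header run at once
theorem pv_absorb (ls : List String) (d : PySem.Dict String (List String)) (h : String)
    (v : List String) :
    ls.foldl pvStepA (d.insert h v, some h) =
      (ls.dropWhile (fun x => !pvIsHeader x)).foldl pvStepA
        (d.insert h (v ++ ls.takeWhile (fun x => !pvIsHeader x)), some h) := by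
  induction ls generalizing v with
  | nil => simp
  | cons l ls ih =>
    by_cases hl : pvIsHeader l = true
    · simp [hl]
    · have hl' : pvIsHeader l = false := by simpa using hl
      simp only [List.dropWhile_cons, List.takeWhile_cons, hl', Bool.not_false,
        List.foldl_cons]
      rw [pvStepA_nonheader _ _ hl']
      simp only [pv_modify_insert]
      rw [ih (v ++ [l])]
      simp

-- the core induction: from a header-fronted suffix, A's fold computes B's chunk fold
theorem pv_core (n : Nat) : ∀ (L : List String), L.length ≤ n →
    (∀ l ls, L = l :: ls → pvIsHeader l = true) →
    ∀ (d : PySem.Dict String (List String)) (cur : Option String),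
      (L.foldl pvStepA (d, cur)).1 = (pvChunks L).foldl (fun d p => d.insert p.1 p.2) d := by
  induction n with
  | zero =>
    intro L hL _ d cur
    rw [List.length_eq_zero_iff.mp (Nat.le_zero.mp hL)]
    simp [pvChunks]
  | succ n ih =>
    intro L hL hhd d cur
    match L with
    | [] => simp [pvChunks]
    | l :: ls =>
      have hl : pvIsHeader l = true := hhd l ls rfl
      rw [List.foldl_cons, pvStepA_header _ _ hl, pv_absorb]
      simp only [List.nil_append]
      rw [show pvChunks (l :: ls) =
          (PySem.Str.replace l "\n" "", ls.takeWhile (fun x => !pvIsHeader x)) ::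
            pvChunks (ls.dropWhile (fun x => !pvIsHeader x)) from by rw [pvChunks]]
      rw [List.foldl_cons]
      refine ih _ ?_ ?_ _ _
      · have := List.length_dropWhile_le (fun x => !pvIsHeader x) ls
        simp only [List.length_cons] at hL
        omega
      · intro l' ls' hdrop
        have := List.head?_dropWhile_not (fun x => !pvIsHeader x) ls
        rw [hdrop] at this; simpa using this

-- ===== VERDICT (by name: the statement is the Claim_ definition above) =====
theorem split_texts_spec : Claim_equal_split_texts := by
  intro lines _
  unfold Spec_split_texts split_texts split_texts_alt
  rw [pv_skip]
  congr 1
  refine pv_core (lines.dropWhile (fun x => !pvIsHeader x)).length _ le_rfl ?_ _ _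
  intro l' ls' hdrop
  have := List.head?_dropWhile_not (fun x => !pvIsHeader x) lines
  rw [hdrop] at this; simpa using this
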